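-- pv_equiv track=rewrite | github.com/janbjorge/gyml | gyml/lexer.py | _read_plain
-- ===== SOURCE A (Python) =====
-- def _read_plain(line: str, pos: int) -> tuple[str, int]:
--     """
--     Read a plain (unquoted) scalar starting at *pos*.
--
--     Stops at a comment marker (#) or a colon that is followed by
--     whitespace or end-of-line.  Trailing spaces are stripped.
--
--     Returns the raw text and the number of source characters consumed
--     (before the strip, so the caller advances past the whitespace).
--     """
--     start = pos
--     while pos < len(line):
--         ch = line[pos]
--         if ch == "#":
--             break
--         if ch == ":" and (pos + 1 >= len(line) or line[pos + 1] == " "):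
--             break
--         pos += 1
--     value = line[start:pos].rstrip()
--     return value, pos - start
-- ===== SOURCE B (Python) =====
-- import re
--
-- _BOUNDARY = re.compile(r'#|:(?=[ ]|\Z)')
--
--
-- def _read_plain(line: str, pos: int) -> tuple[str, int]:
--     """Read a plain scalar using a single regex boundary search."""
--     m = _BOUNDARY.search(line, pos)
--     stop = m.start() if m else len(line)
--     raw = line[pos:stop]
--     return raw.rstrip(), len(raw)
-- ===== Notes on version B (the rewrite author's own statement) =====
-- stated objective: faster
-- what changed: The hand-written per-character Python loop is replaced by a single precompiled regex boundary search (r'#|:(?=[ ]|\Z)') run by the C regex engine, giving the stop index directly; the consumed count is the length of the raw slice instead of a pointer difference.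
-- outside the precondition, e.g. on _read_plain('abc', -2): A returns ('bc', 5), B returns ('bc', 2)
import Mathlib
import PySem

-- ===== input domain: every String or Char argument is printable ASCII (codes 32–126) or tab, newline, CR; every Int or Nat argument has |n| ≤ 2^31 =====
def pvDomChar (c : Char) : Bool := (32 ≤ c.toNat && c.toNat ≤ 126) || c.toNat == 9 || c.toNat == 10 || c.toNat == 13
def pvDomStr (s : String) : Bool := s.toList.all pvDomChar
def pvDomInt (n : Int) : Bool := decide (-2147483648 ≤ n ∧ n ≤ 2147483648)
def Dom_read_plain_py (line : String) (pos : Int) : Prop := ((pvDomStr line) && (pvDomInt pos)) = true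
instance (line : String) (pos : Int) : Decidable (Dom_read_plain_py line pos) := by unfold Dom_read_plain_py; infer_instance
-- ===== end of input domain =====

-- B replaces A's per-character loop by a single precompiled regex boundary search (stop index, then one slice+rstrip); measurably faster (C regex engine, constant factor).


-- ===== PORT A =====
-- A's while loop: advance pos until '#', or ':' followed by space or end-of-line.
def readPlainLoop (cs : List Char) (pos : Int) : Int :=
  if _h : pos < (cs.length : Int) then
    if PySem.List.pyGetD cs pos ' ' = '#' then pos
    else if PySem.List.pyGetD cs pos ' ' = ':' ∧
            ((cs.length : Int) ≤ pos + 1 ∨ PySem.List.pyGetD cs (pos + 1) ' ' = ' ') then pos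
    else readPlainLoop cs (pos + 1)
  else pos
termination_by ((cs.length : Int) - pos).toNat
decreasing_by omega

def read_plain_py (line : String) (pos : Int) : String × Int :=
  let stop := readPlainLoop line.toList pos
  (PySem.Str.rstrip (PySem.Str.slice line (some pos) (some stop)), stop - pos)

-- ===== PORT B =====
-- the regex r'#|:(?=[ ]|\Z)' matches at index i exactly when pvBoundary holds there
def pvBoundary (cs : List Char) (i : Nat) : Bool :=
  cs.getD i ' ' == '#' ||
    (cs.getD i ' ' == ':' && (decide (cs.length ≤ i + 1) || cs.getD (i + 1) ' ' == ' '))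

-- pat.search(line, pos): position of the first match at or after pos; no match → len(line)
def read_plain_py_alt (line : String) (pos : Int) : String × Int :=
  let cs := line.toList
  let stop : Int :=
    match (List.range cs.length).find?
        (fun (i : Nat) => decide (pos ≤ (i : Int)) && pvBoundary cs i) with
    | some i => (i : Int)
    | none => (cs.length : Int)
  let raw := PySem.Str.slice line (some pos) (some stop)
  (PySem.Str.rstrip raw, PySem.Str.len raw)

-- ===== PRECONDITION & SPEC =====
-- Pre_ excludes negative pos, on which A scans via Python's negative-index wraparound
-- (raising IndexError for pos < -len) while B's regex search starts at 0; a scan position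
-- is naturally non-negative.
def Pre_read_plain_py (line : String) (pos : Int) : Prop :=
  0 ≤ pos
instance (line : String) (pos : Int) : Decidable (Pre_read_plain_py line pos) := by
  unfold Pre_read_plain_py; infer_instance
def pvWitness_read_plain_py : String × Int := ("key: value", 0)

def Spec_read_plain_py (line : String) (pos : Int) (out : String × Int) : Prop := out = read_plain_py_alt line pos
instance (line : String) (pos : Int) (out : String × Int) : Decidable (Spec_read_plain_py line pos out) := by unfold Spec_read_plain_py; infer_instance

-- ===== CLAIM (what is proved, stated in full; the proofs are below) =====
def Claim_equal_read_plain_py : Prop := ∀ (line : String) (pos : Int), Dom_read_plain_py line pos → Pre_read_plain_py line pos → Spec_read_plain_py line pos (read_plain_py line pos)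

-- ===== LEMMAS AND PROOFS =====

lemma find_range_none (n p : Nat) (q : Nat → Bool) (h : n ≤ p) :
    (List.range n).find? (fun i => decide (p ≤ i) && q i) = none := by
  rw [List.find?_eq_none]
  intro i hi
  simp only [List.mem_range] at hi
  simp only [Bool.and_eq_true, decide_eq_true_eq, not_and]
  intro hpi
  omega

lemma find_range_here (n : Nat) (q : Nat → Bool) :
    ∀ p, p < n → q p = true →
      (List.range n).find? (fun i => decide (p ≤ i) && q i) = some p := by
  induction n with
  | zero => intro p hp _; omega
  | succ m ih =>
    intro p hp hq
    rw [List.range_succ, List.find?_append]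
    by_cases hpm : p < m
    · rw [ih p hpm hq]; rfl
    · have hpm' : p = m := by omega
      subst hpm'
      rw [find_range_none p p q le_rfl]
      simp [hq]

lemma find_shift (p : Nat) (q : Nat → Bool) (hq : q p = false) :
    (fun i => decide (p ≤ i) && q i) = (fun i => decide (p + 1 ≤ i) && q i) := by
  funext i
  by_cases hip : i = p
  · subst hip; simp [hq]
  · have : (p ≤ i) ↔ (p + 1 ≤ i) := by omega
    simp [this]

lemma boundary_iff (cs : List Char) (p : Nat) :
    pvBoundary cs p = true ↔
      (cs.getD p ' ' = '#' ∨
        (cs.getD p ' ' = ':' ∧ (cs.length ≤ p + 1 ∨ cs.getD (p + 1) ' ' = ' '))) := by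
  simp only [pvBoundary, Bool.or_eq_true, Bool.and_eq_true, beq_iff_eq, decide_eq_true_eq]

lemma loop_end (cs : List Char) (p : Nat) (h : cs.length ≤ p) :
    readPlainLoop cs (p : Int) = (p : Int) := by
  rw [readPlainLoop, dif_neg (by exact_mod_cast not_lt.mpr h)]

lemma loop_step (cs : List Char) (p : Nat) (h : p < cs.length) :
    readPlainLoop cs (p : Int) =
      if pvBoundary cs p then (p : Int) else readPlainLoop cs ((p + 1 : Nat) : Int) := by
  have hInt : (p : Int) < (cs.length : Int) := by exact_mod_cast h
  have hcast : (p : Int) + 1 = ((p + 1 : Nat) : Int) := by push_cast; ring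
  rw [readPlainLoop, dif_pos hInt, PySem.List.pyGetD_natCast, hcast,
    PySem.List.pyGetD_natCast]
  have hlen : ((cs.length : Int) ≤ ((p + 1 : Nat) : Int)) ↔ cs.length ≤ p + 1 :=
    Nat.cast_le
  by_cases hh : cs.getD p ' ' = '#'
  · rw [if_pos hh, if_pos ((boundary_iff cs p).mpr (Or.inl hh))]
  · rw [if_neg hh]
    by_cases hc : cs.getD p ' ' = ':'
    · by_cases hn : cs.length ≤ p + 1 ∨ cs.getD (p + 1) ' ' = ' '
      · rw [if_pos ⟨hc, by rw [hlen]; exact hn⟩,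
          if_pos ((boundary_iff cs p).mpr (Or.inr ⟨hc, hn⟩))]
      · rw [if_neg (fun hx => hn (by rw [← hlen]; exact hx.2)),
          if_neg (fun ht => ((boundary_iff cs p).mp ht).elim hh (fun hx => hn hx.2))]
    · rw [if_neg (fun hx => hc hx.1),
        if_neg (fun ht => ((boundary_iff cs p).mp ht).elim hh (fun hx => hc hx.1))]

lemma loop_eq_aux (cs : List Char) :
    ∀ k p, p ≤ cs.length → cs.length - p = k →
      readPlainLoop cs (p : Int) =
        (match (List.range cs.length).find? (fun i => decide (p ≤ i) && pvBoundary cs i) with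
         | some i => (i : Int)
         | none => (cs.length : Int)) := by
  intro k
  induction k with
  | zero =>
    intro p hp hk
    have hpl : p = cs.length := by omega
    rw [loop_end cs p (by omega), find_range_none cs.length p _ (by omega), hpl]
  | succ k ih =>
    intro p hp hk
    have hplt : p < cs.length := by omega
    rw [loop_step cs p hplt]
    by_cases hb : pvBoundary cs p = true
    · rw [if_pos hb, find_range_here cs.length (pvBoundary cs) p hplt hb]
    · have hb' : pvBoundary cs p = false := by simpa using hb
      rw [if_neg (by simp [hb']), ih (p + 1) (by omega) (by omega),
        find_shift p (pvBoundary cs) hb']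

lemma stop_bounds (cs : List Char) (p : Nat) (hp : p ≤ cs.length) :
    ∃ s : Nat,
      (match (List.range cs.length).find? (fun i => decide (p ≤ i) && pvBoundary cs i) with
       | some i => (i : Int)
       | none => (cs.length : Int)) = (s : Int) ∧ p ≤ s ∧ s ≤ cs.length := by
  cases hf : (List.range cs.length).find? (fun i => decide (p ≤ i) && pvBoundary cs i) with
  | none => exact ⟨cs.length, rfl, hp, le_rfl⟩
  | some i =>
    have hq := List.find?_some hf
    have hmem := List.mem_of_find?_eq_some hf
    simp only [List.mem_range] at hmem
    simp only [Bool.and_eq_true, decide_eq_true_eq] at hq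
    exact ⟨i, rfl, hq.1, by omega⟩

-- ===== VERDICT (by name: the statement is the Claim_ definition above) =====
theorem read_plain_py_spec : Claim_equal_read_plain_py := by
  intro line pos _hdom hpre
  unfold Spec_read_plain_py
  obtain ⟨p, rfl⟩ : ∃ p : Nat, pos = (p : Int) := ⟨pos.toNat, (Int.toNat_of_nonneg hpre).symm⟩
  have hpred : (fun (i : Nat) => decide ((p : Int) ≤ (i : Int)) && pvBoundary line.toList i)
      = (fun i => decide (p ≤ i) && pvBoundary line.toList i) := by
    funext i; simp
  by_cases hple : p ≤ line.toList.length
  · obtain ⟨sN, hs, hps, hsl⟩ := stop_bounds line.toList p hple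
    have hstop := loop_eq_aux line.toList (line.toList.length - p) p hple rfl
    simp only [read_plain_py, read_plain_py_alt, hpred, hstop, hs]
    refine Prod.ext rfl ?_
    rw [PySem.Str.len_eq, PySem.Str.toList_slice]
    simp only [PySem.Chars.slice, PySem.List.slice_natCast, List.length_take, List.length_drop]
    push_cast
    omega
  · have hlen : line.toList.length ≤ p := by omega
    simp only [read_plain_py, read_plain_py_alt, hpred,
      loop_end line.toList p hlen,
      find_range_none line.toList.length p (pvBoundary line.toList) hlen]
    have hraw : PySem.Str.slice line (some (p : Int)) (some (p : Int))
        = PySem.Str.slice line (some (p : Int)) (some ((line.toList.length : Nat) : Int)) := by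
      apply String.toList_inj.mp
      simp only [PySem.Str.toList_slice, PySem.Chars.slice, PySem.List.slice_natCast,
        List.drop_eq_nil_of_le hlen, List.take_nil]
    rw [hraw]
    refine Prod.ext rfl ?_
    rw [PySem.Str.len_eq, PySem.Str.toList_slice]
    simp only [PySem.Chars.slice, PySem.List.slice_natCast, List.drop_eq_nil_of_le hlen,
      List.take_nil, List.length_nil, Nat.cast_zero]
    omega
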